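-- pv_equiv track=rewrite | github.com/rmmATenersystemscom/es-inventory-hub | collectors/m365/mapping.py | is_user_counted
-- ===== SOURCE A (Python) =====
-- from typing import Dict, Any, List, Set, Optional
--
-- def get_license_names(assigned_licenses: List[Dict[str, Any]],
--                       sku_mapping: Dict[str, str]) -> List[str]:
--     """Convert license SKU IDs to product names.
--
--     Args:
--         assigned_licenses: List of license dicts with 'skuId'
--         sku_mapping: GUID to name mapping
--
--     Returns:
--         List of product display names
--     """
--     names = []
--     for license_info in assigned_licenses:
--         sku_id = license_info.get('skuId', '').lower()
--         if sku_id: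
--             name = sku_mapping.get(sku_id, sku_id)  # Fallback to GUID if not mapped
--             names.append(name)
--     return names
--
-- def is_user_counted(user: Dict[str, Any], sku_mapping: Dict[str, str],
--                     excluded_licenses: Set[str]) -> bool:
--     """Determine if a user should be counted based on license filtering.
--
--     Two-stage filtering:
--     1. Exclude users with no licenses (empty assignedLicenses)
--     2. Exclude users where ALL licenses are in the excluded list
--
--     Args:
--         user: User dict with 'assignedLicenses'
--         sku_mapping: GUID to name mapping
--         excluded_licenses: Set of excluded license names
--
--     Returns:
--         True if user should be counted, False otherwise
--     """
--     assigned_licenses = user.get('assignedLicenses', [])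
--
--     # Stage 1: Exclude users with no licenses
--     if not assigned_licenses:
--         return False
--
--     # Get license names for this user
--     license_names = get_license_names(assigned_licenses, sku_mapping)
--
--     if not license_names:
--         return False
--
--     # Stage 2: Exclude users where ALL licenses are excluded types
--     # User is counted if they have at least one non-excluded license
--     for name in license_names:
--         if name not in excluded_licenses:
--             return True
--
--     # All licenses are excluded types
--     return False
-- ===== SOURCE B (Python) =====
-- def is_user_counted(user, sku_mapping, excluded_licenses):
--     # Invert the filtering: instead of translating each license to a name and
--     # scanning names, precompute once from the mapping which SKU ids lead to a
--     # counted (non-excluded) product name, then decide on the SKU ids directly;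
--     # an unmapped SKU id falls back to the GUID itself as the name.
--     counted_skus = {s for s, name in sku_mapping.items()
--                     if name not in excluded_licenses}
--     mapped_skus = set(sku_mapping)
--     for lic in user.get('assignedLicenses', []):
--         s = lic.get('skuId', '').lower()
--         if not s:
--             continue
--         if s in counted_skus:
--             return True
--         if s not in mapped_skus and s not in excluded_licenses:
--             return True
--     return False
-- ===== Notes on version B (the rewrite author's own statement) =====
-- stated objective: alternative
-- what changed: Instead of A's staged pipeline (build the list of license names via the dict lookup per license, guard on emptiness twice, then scan names against the excluded set), B precomputes a reverse index over sku_mapping - the set of SKU ids whose mapped name is non-excluded - and decides directly on each license's SKU id, consulting names only for the unmapped-GUID fallback.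
import Mathlib
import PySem

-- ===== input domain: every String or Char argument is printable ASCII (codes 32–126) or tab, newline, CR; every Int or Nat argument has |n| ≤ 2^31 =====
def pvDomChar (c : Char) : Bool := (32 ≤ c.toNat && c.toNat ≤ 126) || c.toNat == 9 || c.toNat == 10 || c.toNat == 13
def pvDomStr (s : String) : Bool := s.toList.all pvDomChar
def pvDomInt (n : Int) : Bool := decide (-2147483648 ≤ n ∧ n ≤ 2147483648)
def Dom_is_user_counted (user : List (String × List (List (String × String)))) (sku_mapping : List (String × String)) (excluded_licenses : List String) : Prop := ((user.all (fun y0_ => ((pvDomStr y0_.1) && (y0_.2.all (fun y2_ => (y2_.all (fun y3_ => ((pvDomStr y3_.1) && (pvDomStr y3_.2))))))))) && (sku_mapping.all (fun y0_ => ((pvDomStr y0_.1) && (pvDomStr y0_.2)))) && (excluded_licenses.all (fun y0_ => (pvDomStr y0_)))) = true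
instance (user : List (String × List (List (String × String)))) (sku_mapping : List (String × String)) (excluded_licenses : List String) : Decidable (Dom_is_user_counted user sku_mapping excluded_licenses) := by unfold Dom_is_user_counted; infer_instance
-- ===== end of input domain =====

-- B inverts the filtering: it precomputes from sku_mapping the set of SKU ids whose
-- mapped name is non-excluded and decides per SKU id, instead of A's staged pipeline
-- that materialises the list of license names and scans it (objective: alternative).

-- ===== PORT A =====
-- helper get_license_names: one loop appending mapped names, skipping empty skuIds
def pvGetLicenseNames (assigned_licenses : List (List (String × String))) (sku_mapping : List (String × String)) : List String :=
  assigned_licenses.foldl (fun names license_info =>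
    let sku_id := PySem.Str.lower (PySem.Dict.getD ⟨license_info⟩ "skuId" "")
    if sku_id ≠ "" then names ++ [PySem.Dict.getD ⟨sku_mapping⟩ sku_id sku_id]
    else names) []

-- the stage-2 loop with early exit ('for name in license_names: if name not in excluded: return True')
def pvStage2 (license_names : List String) (excluded_licenses : List String) : Bool :=
  match license_names with
  | [] => false
  | name :: rest =>
    if !(PySem.Set.contains excluded_licenses name) then true
    else pvStage2 rest excluded_licenses

def is_user_counted (user : List (String × List (List (String × String)))) (sku_mapping : List (String × String)) (excluded_licenses : List String) : Bool :=
  let assigned_licenses := PySem.Dict.getD ⟨user⟩ "assignedLicenses" []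
  if assigned_licenses = [] then false
  else
    let license_names := pvGetLicenseNames assigned_licenses sku_mapping
    if license_names = [] then false
    else pvStage2 license_names excluded_licenses

-- ===== PORT B =====
-- the set comprehension '{s for s, name in sku_mapping.items() if name not in excluded_licenses}'
def pvCountedSkus (sku_mapping : List (String × String)) (excluded_licenses : List String) : PySem.Set String :=
  sku_mapping.foldl (fun acc p =>
    if !(PySem.Set.contains excluded_licenses p.2) then PySem.Set.add acc p.1 else acc)
    PySem.Set.empty

-- the loop over assignedLicenses with its two early-exit tests and the 'continue' on empty skuId
def pvScanLicenses (licenses : List (List (String × String))) (counted_skus mapped_skus : PySem.Set String) (excluded_licenses : List String) : Bool :=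
  match licenses with
  | [] => false
  | lic :: rest =>
    let s := PySem.Str.lower (PySem.Dict.getD ⟨lic⟩ "skuId" "")
    if s = "" then pvScanLicenses rest counted_skus mapped_skus excluded_licenses
    else if PySem.Set.contains counted_skus s then true
    else if !(PySem.Set.contains mapped_skus s) && !(PySem.Set.contains excluded_licenses s) then true
    else pvScanLicenses rest counted_skus mapped_skus excluded_licenses

def is_user_counted_alt (user : List (String × List (List (String × String)))) (sku_mapping : List (String × String)) (excluded_licenses : List String) : Bool :=
  let counted_skus := pvCountedSkus sku_mapping excluded_licenses
  let mapped_skus := PySem.Set.ofList (PySem.Dict.keys ⟨sku_mapping⟩)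
  pvScanLicenses (PySem.Dict.getD ⟨user⟩ "assignedLicenses" []) counted_skus mapped_skus excluded_licenses

-- ===== PRECONDITION & SPEC =====
-- Pre_ requires sku_mapping's keys to be distinct, exactly as the keys of every Python
-- dict are; association lists with duplicate keys exist only on the Lean side (no Python
-- input produces them), and there B's reverse index may see an occurrence A's
-- first-match lookup ignores.
def Pre_is_user_counted (user : List (String × List (List (String × String)))) (sku_mapping : List (String × String)) (excluded_licenses : List String) : Prop :=
  (sku_mapping.map Prod.fst).Nodup
instance (user : List (String × List (List (String × String)))) (sku_mapping : List (String × String)) (excluded_licenses : List String) : Decidable (Pre_is_user_counted user sku_mapping excluded_licenses) := by unfold Pre_is_user_counted; infer_instance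

def pvWitness_is_user_counted : (List (String × List (List (String × String)))) × (List (String × String)) × List String :=
  ([("assignedLicenses", [[("skuId", "G1")]])], [("g1", "Office")], ["Flow Free"])

def Spec_is_user_counted (user : List (String × List (List (String × String)))) (sku_mapping : List (String × String)) (excluded_licenses : List String) (out : Bool) : Prop := out = is_user_counted_alt user sku_mapping excluded_licenses
instance (user : List (String × List (List (String × String)))) (sku_mapping : List (String × String)) (excluded_licenses : List String) (out : Bool) : Decidable (Spec_is_user_counted user sku_mapping excluded_licenses out) := by unfold Spec_is_user_counted; infer_instance

-- ===== CLAIM (what is proved, stated in full; the proofs are below) =====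
def Claim_equal_is_user_counted : Prop := ∀ (user : List (String × List (List (String × String)))) (sku_mapping : List (String × String)) (excluded_licenses : List String), Dom_is_user_counted user sku_mapping excluded_licenses → Pre_is_user_counted user sku_mapping excluded_licenses → Spec_is_user_counted user sku_mapping excluded_licenses (is_user_counted user sku_mapping excluded_licenses)

-- ===== LEMMAS AND PROOFS =====

-- A's early-exit scan is List.any of 'not excluded'
theorem pvStage2_eq_any (names excl : List String) :
    pvStage2 names excl = names.any (fun n => !(PySem.Set.contains excl n)) := by
  induction names with
  | nil => rfl
  | cons n rest ih => simp [pvStage2, ih]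

-- B's scan loop is List.any of its per-license test
theorem pvScanLicenses_eq_any (ls : List (List (String × String))) (c m : PySem.Set String) (e : List String) :
    pvScanLicenses ls c m e = ls.any (fun lic =>
      let s := PySem.Str.lower (PySem.Dict.getD ⟨lic⟩ "skuId" "")
      !(s == "") && (PySem.Set.contains c s || (!(PySem.Set.contains m s) && !(PySem.Set.contains e s)))) := by
  induction ls with
  | nil => rfl
  | cons lic rest ih =>
    simp only [pvScanLicenses, List.any_cons, ← ih]
    split_ifs with h1 h2 h3 <;>
      simp_all [PySem.Set.contains]

-- A's name list is a filter-map over the licenses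
theorem pvGetLicenseNames_eq (assigned : List (List (String × String))) (m : List (String × String)) :
    pvGetLicenseNames assigned m
      = (assigned.filter (fun lic =>
            PySem.Str.lower (PySem.Dict.getD ⟨lic⟩ "skuId" "") ≠ "")).map
          (fun lic =>
            let s := PySem.Str.lower (PySem.Dict.getD ⟨lic⟩ "skuId" "")
            PySem.Dict.getD ⟨m⟩ s s) := by
  unfold pvGetLicenseNames
  rw [PySem.List.foldl_append_ite
    (p := fun lic => PySem.Str.lower (PySem.Dict.getD ⟨lic⟩ "skuId" "") ≠ "")
    (f := fun lic =>
      let s := PySem.Str.lower (PySem.Dict.getD ⟨lic⟩ "skuId" "")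
      PySem.Dict.getD ⟨m⟩ s s)]
  simp [ne_eq]

-- membership in the reverse index built by pvCountedSkus
theorem mem_pvCountedSkus (m : List (String × String)) (e : List String) (x : String) :
    x ∈ pvCountedSkus m e ↔ ∃ v, (x, v) ∈ m ∧ v ∉ e := by
  have main : ∀ (l : List (String × String)) (acc : PySem.Set String),
      x ∈ l.foldl (fun acc p =>
        if !(PySem.Set.contains e p.2) then PySem.Set.add acc p.1 else acc) acc
      ↔ x ∈ acc ∨ ∃ v, (x, v) ∈ l ∧ v ∉ e := by
    intro l
    induction l with
    | nil => simp
    | cons p rest ih =>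
      intro acc
      simp only [List.foldl_cons]
      by_cases h : p.2 ∈ e
      · rw [if_neg (by simp [PySem.Set.contains, h])]
        rw [ih]
        constructor
        · rintro (ha | ⟨v, hv, hve⟩)
          · exact Or.inl ha
          · exact Or.inr ⟨v, List.mem_cons_of_mem _ hv, hve⟩
        · rintro (ha | ⟨v, hv, hve⟩)
          · exact Or.inl ha
          · rcases List.mem_cons.mp hv with heq | hv'
            · exact absurd (by rw [← heq] at h; exact h) (by simpa using hve)
            · exact Or.inr ⟨v, hv', hve⟩
      · rw [if_pos (by simp [PySem.Set.contains, h])]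
        rw [ih]
        simp only [PySem.Set.mem_add]
        constructor
        · rintro (⟨ha | hx⟩ | ⟨v, hv, hve⟩)
          · exact Or.inl ha
          · exact Or.inr ⟨p.2, by rw [hx]; exact List.mem_cons_self .., h⟩
          · exact Or.inr ⟨v, List.mem_cons_of_mem _ hv, hve⟩
        · rintro (ha | ⟨v, hv, hve⟩)
          · exact Or.inl (Or.inl ha)
          · rcases List.mem_cons.mp hv with heq | hv'
            · exact Or.inl (Or.inr (congrArg Prod.fst heq))
            · exact Or.inr ⟨v, hv', hve⟩
  have := main m PySem.Set.empty
  simpa [pvCountedSkus, PySem.Set.empty] using this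

-- with distinct keys, a pair of m at key s carries THE value getD returns
theorem pv_getD_of_pair (m : List (String × String)) (hnd : (m.map Prod.fst).Nodup)
    {p : String × String} (hp : p ∈ m) (d0 : String) :
    PySem.Dict.getD (⟨m⟩ : PySem.Dict String String) p.1 d0 = p.2 := by
  have hitems : (p.1, p.2) ∈ (⟨m⟩ : PySem.Dict String String).items := by
    simpa using hp
  have hnd' : ((⟨m⟩ : PySem.Dict String String).keys).Nodup := by
    simpa [PySem.Dict.keys] using hnd
  exact PySem.Dict.getD_of_mem_items _ hitems hnd' _

-- getD of an unmapped key falls back to the default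
theorem pv_getD_of_unmapped (m : List (String × String)) {s : String}
    (hs : s ∉ m.map Prod.fst) (d0 : String) :
    PySem.Dict.getD (⟨m⟩ : PySem.Dict String String) s d0 = d0 := by
  have : (⟨m⟩ : PySem.Dict String String).get? s = none := by
    rw [PySem.Dict.get?_eq_none_iff_not_mem_keys]
    simpa [PySem.Dict.keys] using hs
  simp [PySem.Dict.getD, this]

-- the pointwise bridge: with distinct mapping keys, B's per-SKU test equals
-- 'the name A would look up is not excluded'
theorem pv_bridge (m : List (String × String)) (e : List String)
    (hnd : (m.map Prod.fst).Nodup) (s : String) :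
    (PySem.Set.contains (pvCountedSkus m e) s
      || (!(PySem.Set.contains (PySem.Set.ofList (PySem.Dict.keys ⟨m⟩)) s)
          && !(PySem.Set.contains e s)))
    = !(PySem.Set.contains e (PySem.Dict.getD ⟨m⟩ s s)) := by
  have hkeys : PySem.Dict.keys (⟨m⟩ : PySem.Dict String String) = m.map Prod.fst := rfl
  by_cases hmem : s ∈ m.map Prod.fst
  · obtain ⟨p, hp, hps⟩ := List.mem_map.mp hmem
    have hgetD : PySem.Dict.getD (⟨m⟩ : PySem.Dict String String) s s = p.2 := by
      rw [← hps]; exact pv_getD_of_pair m hnd hp _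
    by_cases hx : p.2 ∈ e
    · have hc : s ∉ pvCountedSkus m e := by
        rw [mem_pvCountedSkus]
        rintro ⟨v, hv, hve⟩
        have hg : PySem.Dict.getD (⟨m⟩ : PySem.Dict String String) s s = v :=
          pv_getD_of_pair m hnd hv s
        rw [hgetD] at hg
        exact hve (hg ▸ hx)
      simp [PySem.Set.contains, PySem.Set.mem_ofList, hkeys, hgetD, hx, hc, hmem]
    · have hc : s ∈ pvCountedSkus m e := by
        rw [mem_pvCountedSkus]
        exact ⟨p.2, by rw [← hps]; simpa using hp, hx⟩
      simp [PySem.Set.contains, hgetD, hx, hc]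
  · have hget : PySem.Dict.getD (⟨m⟩ : PySem.Dict String String) s s = s :=
      pv_getD_of_unmapped m hmem s
    have hc : s ∉ pvCountedSkus m e := by
      rw [mem_pvCountedSkus]
      rintro ⟨v, hv, _⟩
      exact hmem (by simpa using List.mem_map_of_mem (f := Prod.fst) hv)
    simp [PySem.Set.contains, PySem.Set.mem_ofList, hkeys, hget, hc, hmem]

theorem pv_main (user : List (String × List (List (String × String)))) (sku_mapping : List (String × String)) (excluded_licenses : List String)
    (hnd : (sku_mapping.map Prod.fst).Nodup) :
    is_user_counted user sku_mapping excluded_licenses = is_user_counted_alt user sku_mapping excluded_licenses := by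
  set assigned := PySem.Dict.getD (⟨user⟩ : PySem.Dict String (List (List (String × String)))) "assignedLicenses" [] with hass
  set Q : List (String × String) → Bool := fun lic =>
    let s := PySem.Str.lower (PySem.Dict.getD ⟨lic⟩ "skuId" "")
    !(s == "") && !(PySem.Set.contains excluded_licenses (PySem.Dict.getD ⟨sku_mapping⟩ s s)) with hQ
  have hB : is_user_counted_alt user sku_mapping excluded_licenses = assigned.any Q := by
    simp only [is_user_counted_alt, ← hass, pvScanLicenses_eq_any]
    refine List.any_congr rfl (fun lic => ?_)
    simp only [hQ]
    rw [pv_bridge sku_mapping excluded_licenses hnd]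
  have hnames : (pvGetLicenseNames assigned sku_mapping).any
      (fun n => !(PySem.Set.contains excluded_licenses n)) = assigned.any Q := by
    rw [pvGetLicenseNames_eq]
    rw [List.any_map, List.any_filter]
    refine List.any_congr rfl (fun lic => ?_)
    simp only [hQ]
    rw [Bool.eq_iff_iff]
    simp [Function.comp, ne_eq]
  have hA : is_user_counted user sku_mapping excluded_licenses = assigned.any Q := by
    simp only [is_user_counted, ← hass]
    by_cases h1 : assigned = []
    · simp [h1]
    · by_cases h2 : pvGetLicenseNames assigned sku_mapping = []
      · rw [if_neg h1, if_pos h2]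
        rw [← hnames, h2]
        rfl
      · rw [if_neg h1, if_neg h2, pvStage2_eq_any, hnames]
  rw [hA, hB]

-- ===== VERDICT (by name: the statement is the Claim_ definition above) =====
theorem is_user_counted_spec : Claim_equal_is_user_counted := by
  intro user sku_mapping excluded_licenses _ hpre
  exact pv_main user sku_mapping excluded_licenses hpre
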